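-- pv_equiv track=rewrite | github.com/idaneamar/stock-api | app/services/options_service.py | _parse_script_summary
-- ===== SOURCE A (Python) =====
-- def _parse_script_summary(script_name: str, stdout: str, stderr: str) -> str:
--     """Extract a one-line human-readable summary from a script's output."""
--     combined = stdout + "\n" + stderr
--     lines = [l.strip() for l in combined.splitlines() if l.strip()]
--
--     if script_name == "fetch_sp500_symbols.py":
--         for line in reversed(lines):
--             if "symbol" in line.lower() or "wrote" in line.lower() or "updated" in line.lower() or "saved" in line.lower():
--                 return line[:200]
--         # Look for count
--         for line in reversed(lines):
--             if any(k in line.lower() for k in ["new", "removed", "unchanged", "total"]):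
--                 return line[:200]
--
--     elif script_name == "prefetch_options_datasp.py":
--         for line in reversed(lines):
--             if any(k in line.lower() for k in ["done", "complete", "skipped", "fetched", "saved", "error", "total"]):
--                 return line[:200]
--
--     elif script_name in ("optsp.py", "opsp.py"):
--         for line in reversed(lines):
--             if "saved" in line.lower() or "recommendation" in line.lower() or "returned" in line.lower():
--                 return line[:200]
--         for line in reversed(lines):
--             if "iron_condor" in line.lower():
--                 return line[:200]
--
--     elif script_name == "exeopt.py":
--         for line in reversed(lines):
--             if any(k in line.lower() for k in ["order", "placed", "executed", "ibkr", "done"]):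
--                 return line[:200]
--
--     # Fallback: last non-empty line
--     for line in reversed(lines):
--         return line[:200]
--     return "Completed"
-- ===== SOURCE B (Python) =====
-- _TIERS = {
--     "fetch_sp500_symbols.py": [
--         ["symbol", "wrote", "updated", "saved"],
--         ["new", "removed", "unchanged", "total"],
--     ],
--     "prefetch_options_datasp.py": [
--         ["done", "complete", "skipped", "fetched", "saved", "error", "total"],
--     ],
--     "optsp.py": [
--         ["saved", "recommendation", "returned"],
--         ["iron_condor"],
--     ],
--     "opsp.py": [
--         ["saved", "recommendation", "returned"],
--         ["iron_condor"],
--     ],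
--     "exeopt.py": [
--         ["order", "placed", "executed", "ibkr", "done"],
--     ],
-- }
--
--
-- def _parse_script_summary(script_name: str, stdout: str, stderr: str) -> str:
--     """Single forward pass: score each line by the first keyword tier it matches
--     (the fallback acts as the last, universal tier) and keep the best-ranked line,
--     later lines winning ties."""
--     tiers = _TIERS.get(script_name, [])
--     best_rank = len(tiers) + 1
--     best_line = "Completed"
--     for raw in (stdout + "\n" + stderr).splitlines():
--         line = raw.strip()
--         if not line:
--             continue
--         low = line.lower()
--         rank = 0
--         for tier in tiers:
--             if any(k in low for k in tier):
--                 break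
--             rank += 1
--         if rank <= best_rank:
--             best_rank = rank
--             best_line = line[:200]
--     return best_line
-- ===== Notes on version B (the rewrite author's own statement) =====
-- stated objective: alternative
-- what changed: Replaces A's per-script chains of staged reverse scans (one pass per keyword tier plus a fallback pass) by a single forward pass that scores every line with the index of the first tier it matches (the fallback being a universal last tier) and keeps the best-ranked line with later lines winning ties (argmin with last-wins).
import Mathlib
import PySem

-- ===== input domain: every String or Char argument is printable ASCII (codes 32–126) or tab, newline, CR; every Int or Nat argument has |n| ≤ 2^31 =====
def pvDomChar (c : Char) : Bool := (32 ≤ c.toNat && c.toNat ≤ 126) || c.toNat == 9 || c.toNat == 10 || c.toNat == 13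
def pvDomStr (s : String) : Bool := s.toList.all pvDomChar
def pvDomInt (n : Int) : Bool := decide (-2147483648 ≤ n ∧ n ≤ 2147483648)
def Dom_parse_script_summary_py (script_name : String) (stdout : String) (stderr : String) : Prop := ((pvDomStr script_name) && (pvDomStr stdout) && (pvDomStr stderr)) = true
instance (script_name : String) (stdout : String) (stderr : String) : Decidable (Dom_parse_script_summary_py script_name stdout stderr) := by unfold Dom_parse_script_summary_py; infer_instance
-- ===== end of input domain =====

-- B replaces A's staged reverse keyword scans by ONE forward pass that ranks each line
-- by the first keyword tier it matches and keeps the best-ranked, latest line (objective: alternative).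

-- ===== PORT A =====
-- lines = [l.strip() for l in combined.splitlines() if l.strip()]
def psA_lines (combined : String) : List String :=
  (PySem.Str.splitlines combined).filterMap
    (fun l => if PySem.Str.strip l ≠ "" then some (PySem.Str.strip l) else none)

-- "for line in reversed(lines): if p(line): return line[:200]" (none = fell through)
def psA_revFind (lines : List String) (p : String → Bool) : Option String :=
  (lines.reverse.find? p).map (fun line => PySem.Str.slice line none (some 200))

def psA_has (line kw : String) : Bool := PySem.Str.isIn kw (PySem.Str.lower line)

def parse_script_summary_py (script_name : String) (stdout : String) (stderr : String) : String :=
  let combined := stdout ++ "\n" ++ stderr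
  let lines := psA_lines combined
  -- Fallback: last non-empty line, else "Completed"
  let fallback : String :=
    match lines.reverse with
    | [] => "Completed"
    | line :: _ => PySem.Str.slice line none (some 200)
  if script_name = "fetch_sp500_symbols.py" then
    match psA_revFind lines (fun line =>
        psA_has line "symbol" || psA_has line "wrote" || psA_has line "updated" || psA_has line "saved") with
    | some r => r
    | none =>
      match psA_revFind lines (fun line =>
          ["new", "removed", "unchanged", "total"].any (fun k => psA_has line k)) with
      | some r => r
      | none => fallback
  else if script_name = "prefetch_options_datasp.py" then
    match psA_revFind lines (fun line =>
        ["done", "complete", "skipped", "fetched", "saved", "error", "total"].any (fun k => psA_has line k)) with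
    | some r => r
    | none => fallback
  else if script_name = "optsp.py" ∨ script_name = "opsp.py" then
    match psA_revFind lines (fun line =>
        psA_has line "saved" || psA_has line "recommendation" || psA_has line "returned") with
    | some r => r
    | none =>
      match psA_revFind lines (fun line => psA_has line "iron_condor") with
      | some r => r
      | none => fallback
  else if script_name = "exeopt.py" then
    match psA_revFind lines (fun line =>
        ["order", "placed", "executed", "ibkr", "done"].any (fun k => psA_has line k)) with
    | some r => r
    | none => fallback
  else fallback

-- ===== PORT B =====
-- the _TIERS dict of Source B (association list in insertion order)
def psB_TIERS : PySem.Dict String (List (List String)) :=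
  PySem.Dict.ofList
  [ ("fetch_sp500_symbols.py",
      [["symbol", "wrote", "updated", "saved"], ["new", "removed", "unchanged", "total"]]),
    ("prefetch_options_datasp.py",
      [["done", "complete", "skipped", "fetched", "saved", "error", "total"]]),
    ("optsp.py", [["saved", "recommendation", "returned"], ["iron_condor"]]),
    ("opsp.py", [["saved", "recommendation", "returned"], ["iron_condor"]]),
    ("exeopt.py", [["order", "placed", "executed", "ibkr", "done"]]) ]

-- any(k in low for k in tier)
def psB_hit (tier : List String) (low : String) : Bool :=
  tier.any (fun k => PySem.Str.isIn k low)

-- "rank = 0; for tier in tiers: if any(...): break; rank += 1"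
def psB_rank : List (List String) → String → Nat
  | [], _ => 0
  | t :: ts, low => if psB_hit t low then 0 else psB_rank ts low + 1

-- one loop iteration over a raw splitline
def psB_step (tiers : List (List String)) (s : Nat × String) (raw : String) : Nat × String :=
  let line := PySem.Str.strip raw
  if line = "" then s
  else
    let r := psB_rank tiers (PySem.Str.lower line)
    if r ≤ s.1 then (r, PySem.Str.slice line none (some 200)) else s

def parse_script_summary_py_alt (script_name : String) (stdout : String) (stderr : String) : String :=
  let tiers := PySem.Dict.getD psB_TIERS script_name []
  ((PySem.Str.splitlines (stdout ++ "\n" ++ stderr)).foldl (psB_step tiers)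
    (tiers.length + 1, "Completed")).2

-- ===== PRECONDITION & SPEC =====
def Spec_parse_script_summary_py (script_name : String) (stdout : String) (stderr : String) (out : String) : Prop := out = parse_script_summary_py_alt script_name stdout stderr
instance (script_name : String) (stdout : String) (stderr : String) (out : String) : Decidable (Spec_parse_script_summary_py script_name stdout stderr out) := by unfold Spec_parse_script_summary_py; infer_instance

-- ===== CLAIM (what is proved, stated in full; the proofs are below) =====
def Claim_equal_parse_script_summary_py : Prop := ∀ (script_name : String) (stdout : String) (stderr : String), Dom_parse_script_summary_py script_name stdout stderr → Spec_parse_script_summary_py script_name stdout stderr (parse_script_summary_py script_name stdout stderr)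

-- ===== LEMMAS AND PROOFS =====

-- abbreviations used only by the proofs
def pvCut (line : String) : String := PySem.Str.slice line none (some 200)

-- the tiered reverse-scan (A's shape, generic in the tier list)
def pvScan (rev : List String) : List (List String) → Option String
  | [] => none
  | t :: ts =>
    match rev.find? (fun line => psB_hit t (PySem.Str.lower line)) with
    | some line => some line
    | none => pvScan rev ts

-- A's result shape for a tier list
def pvRes (T : List (List String)) (lines : List String) : String :=
  match pvScan lines.reverse T with
  | some line => pvCut line
  | none =>
    match lines.reverse with
    | [] => "Completed"
    | line :: _ => pvCut line

-- B's loop body on an already-stripped non-empty line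
def pvCore (T : List (List String)) (s : Nat × String) (line : String) : Nat × String :=
  let r := psB_rank T (PySem.Str.lower line)
  if r ≤ s.1 then (r, pvCut line) else s

-- minimum rank over lines, sentinel T.length+1
def pvMnr (T : List (List String)) (lines : List String) : Nat :=
  lines.foldl (fun m l => min m (psB_rank T (PySem.Str.lower l))) (T.length + 1)

theorem pv_rank_le (T : List (List String)) (low : String) : psB_rank T low ≤ T.length := by
  induction T with
  | nil => simp [psB_rank]
  | cons t ts ih => simp [psB_rank]; split <;> simp <;> omega

theorem pv_rank_len_no_hit (T : List (List String)) (low : String)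
    (h : T.length ≤ psB_rank T low) : ∀ t ∈ T, psB_hit t low = false := by
  induction T with
  | nil => simp
  | cons t ts ih =>
    simp only [psB_rank] at h
    by_cases ht : psB_hit t low
    · rw [if_pos ht] at h; simp at h
    · rw [if_neg ht] at h
      intro u hu
      rcases List.mem_cons.mp hu with rfl | hu'
      · simpa using ht
      · exact ih (by simpa using Nat.le_of_succ_le_succ h) u hu'

theorem pv_scan_none (T : List (List String)) (rev : List String)
    (h : ∀ l ∈ rev, ∀ t ∈ T, psB_hit t (PySem.Str.lower l) = false) :
    pvScan rev T = none := by
  induction T with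
  | nil => rfl
  | cons t ts ih =>
    have hf : rev.find? (fun line => psB_hit t (PySem.Str.lower line)) = none := by
      rw [List.find?_eq_none]
      intro l hl; simpa using h l hl t (List.mem_cons_self ..)
    simp only [pvScan, hf]
    exact ih (fun l hl u hu => h l hl u (List.mem_cons_of_mem _ hu))

-- if x has the (strictly) smallest rank and it actually hits some tier, the scan of x::rev returns x
theorem pv_scan_head (T : List (List String)) (rev : List String) (x : String)
    (hmin : ∀ l ∈ rev, psB_rank T (PySem.Str.lower x) ≤ psB_rank T (PySem.Str.lower l))
    (hlt : psB_rank T (PySem.Str.lower x) < T.length) :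
    pvScan (x :: rev) T = some x := by
  induction T with
  | nil => simp at hlt
  | cons t ts ih =>
    by_cases ht : psB_hit t (PySem.Str.lower x)
    · simp only [pvScan, List.find?_cons, ht]
    · have hrx : psB_rank (t :: ts) (PySem.Str.lower x) = psB_rank ts (PySem.Str.lower x) + 1 := by
        simp [psB_rank, ht]
      have hnone : ∀ l ∈ rev, psB_hit t (PySem.Str.lower l) = false := by
        intro l hl
        have := hmin l hl
        rw [hrx] at this
        by_contra hc
        simp only [Bool.not_eq_false] at hc
        simp [psB_rank, hc] at this
      have hf : (x :: rev).find? (fun line => psB_hit t (PySem.Str.lower line)) = none := by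
        rw [List.find?_eq_none]
        intro l hl
        rcases List.mem_cons.mp hl with rfl | hl'
        · simpa using ht
        · simpa using hnone l hl'
      simp only [pvScan, hf]
      apply ih
      · intro l hl
        have hx := hmin l hl
        rw [hrx] at hx
        by_cases htl : psB_hit t (PySem.Str.lower l)
        · exfalso
          rw [show psB_rank (t :: ts) (PySem.Str.lower l) = 0 from by simp [psB_rank, htl]] at hx
          omega
        · rw [show psB_rank (t :: ts) (PySem.Str.lower l) = psB_rank ts (PySem.Str.lower l) + 1 from by
            simp [psB_rank, htl]] at hx
          omega
      · rw [hrx] at hlt; simpa using Nat.lt_of_succ_lt_succ hlt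

-- if some line of rev beats x strictly, prepending x changes nothing (and the scan succeeds)
theorem pv_scan_skip (T : List (List String)) (rev : List String) (x : String)
    (h : ∃ l ∈ rev, psB_rank T (PySem.Str.lower l) < psB_rank T (PySem.Str.lower x)) :
    ∃ y, pvScan rev T = some y ∧ pvScan (x :: rev) T = some y := by
  induction T with
  | nil => obtain ⟨l, _, hl⟩ := h; simp [psB_rank] at hl
  | cons t ts ih =>
    obtain ⟨l0, hl0m, hl0⟩ := h
    have htx : psB_hit t (PySem.Str.lower x) = false := by
      by_contra hc
      simp only [Bool.not_eq_false] at hc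
      simp [psB_rank, hc] at hl0
    by_cases hhit : ∃ l ∈ rev, psB_hit t (PySem.Str.lower l) = true
    · have : (rev.find? (fun line => psB_hit t (PySem.Str.lower line))).isSome := by
        rw [List.find?_isSome]
        obtain ⟨l, hl, hh⟩ := hhit
        exact ⟨l, hl, by simpa using hh⟩
      obtain ⟨y, hy⟩ := Option.isSome_iff_exists.mp this
      refine ⟨y, ?_, ?_⟩ <;> simp [pvScan, htx, hy]
    · rw [not_exists] at hhit
      simp only [not_and] at hhit
      have hf : rev.find? (fun line => psB_hit t (PySem.Str.lower line)) = none := by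
        rw [List.find?_eq_none]
        intro l hl; simpa using hhit l hl
      have hfx : (x :: rev).find? (fun line => psB_hit t (PySem.Str.lower line)) = none := by
        rw [List.find?_eq_none]
        intro l hl
        rcases List.mem_cons.mp hl with rfl | hl'
        · simpa using htx
        · simpa using hhit l hl'
      have hstep : ∃ l ∈ rev, psB_rank ts (PySem.Str.lower l) < psB_rank ts (PySem.Str.lower x) := by
        refine ⟨l0, hl0m, ?_⟩
        have h0 : psB_hit t (PySem.Str.lower l0) = false := by simpa using hhit l0 hl0m
        simpa [psB_rank, h0, htx] using hl0
      obtain ⟨y, h1, h2⟩ := ih hstep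
      exact ⟨y, by simp [pvScan, hf, h1], by simp [pvScan, hfx, h2]⟩

-- properties of the running minimum
theorem pv_foldl_min_le {T : List (List String)} : ∀ (lines : List String) (s : Nat),
    (lines.foldl (fun m l => min m (psB_rank T (PySem.Str.lower l))) s) ≤ s ∧
    (∀ l ∈ lines, (lines.foldl (fun m l => min m (psB_rank T (PySem.Str.lower l))) s) ≤ psB_rank T (PySem.Str.lower l)) ∧
    ((lines.foldl (fun m l => min m (psB_rank T (PySem.Str.lower l))) s) = s ∨
      ∃ l ∈ lines, psB_rank T (PySem.Str.lower l) = (lines.foldl (fun m l => min m (psB_rank T (PySem.Str.lower l))) s)) := by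
  intro lines
  induction lines with
  | nil => intro s; refine ⟨le_refl _, by simp, Or.inl rfl⟩
  | cons a rest ih =>
    intro s
    obtain ⟨h1, h2, h3⟩ := ih (min s (psB_rank T (PySem.Str.lower a)))
    refine ⟨le_trans h1 (by omega), ?_, ?_⟩
    · intro l hl
      rcases List.mem_cons.mp hl with rfl | hl'
      · exact le_trans h1 (by omega)
      · exact h2 l hl'
    · rcases h3 with he | ⟨l, hl, hle⟩
      · by_cases hc : psB_rank T (PySem.Str.lower a) ≤ s
        · exact Or.inr ⟨a, List.mem_cons_self .., by simp only [List.foldl_cons]; omega⟩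
        · exact Or.inl (by simp only [List.foldl_cons]; omega)
      · exact Or.inr ⟨l, List.mem_cons_of_mem _ hl, by simpa using hle⟩

theorem pv_mnr_append (T : List (List String)) (lines : List String) (x : String) :
    pvMnr T (lines ++ [x]) = min (pvMnr T lines) (psB_rank T (PySem.Str.lower x)) := by
  simp [pvMnr]

-- MAIN invariant: the forward fold computes (min rank, A's tier-scan result)
theorem pv_fold_char (T : List (List String)) (lines : List String) :
    lines.foldl (pvCore T) (T.length + 1, "Completed") = (pvMnr T lines, pvRes T lines) := by
  induction lines using List.reverseRecOn with
  | nil =>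
    have h0 : pvScan ([] : List String) T = none := pv_scan_none T [] (by simp)
    simp [pvMnr, pvRes, h0]
  | append_singleton lines x ih =>
    rw [List.foldl_append, ih, pv_mnr_append]
    obtain ⟨hs, hmem0, hach0⟩ := pv_foldl_min_le (T := T) lines (T.length + 1)
    have hmem : ∀ l ∈ lines, pvMnr T lines ≤ psB_rank T (PySem.Str.lower l) := hmem0
    have hach : pvMnr T lines = T.length + 1 ∨
        ∃ l ∈ lines, psB_rank T (PySem.Str.lower l) = pvMnr T lines := hach0
    by_cases hle : psB_rank T (PySem.Str.lower x) ≤ pvMnr T lines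
    · -- x becomes the new best
      have hres : pvRes T (lines ++ [x]) = pvCut x := by
        unfold pvRes
        simp only [List.reverse_append, List.reverse_cons, List.reverse_nil, List.nil_append,
          List.singleton_append]
        by_cases hlt : psB_rank T (PySem.Str.lower x) < T.length
        · rw [pv_scan_head T lines.reverse x
            (fun l hl => le_trans hle (hmem l (List.mem_reverse.mp hl))) hlt]
        · -- rank x = T.length: nothing hits anything
          have hxlen : psB_rank T (PySem.Str.lower x) = T.length := by
            have := pv_rank_le T (PySem.Str.lower x); omega
          have hnone : pvScan (x :: lines.reverse) T = none := by
            apply pv_scan_none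
            intro l hl t ht
            rcases List.mem_cons.mp hl with rfl | hl'
            · exact pv_rank_len_no_hit T _ (le_of_eq hxlen.symm) t ht
            · have h1 := hmem l (List.mem_reverse.mp hl')
              have h3 : T.length ≤ psB_rank T (PySem.Str.lower l) := by omega
              exact pv_rank_len_no_hit T _ h3 t ht
          rw [hnone]
      rw [hres, show min (pvMnr T lines) (psB_rank T (PySem.Str.lower x))
            = psB_rank T (PySem.Str.lower x) from by omega]
      simp [pvCore, hle]
    · -- x is ignored
      have hx : pvMnr T lines < psB_rank T (PySem.Str.lower x) := Nat.lt_of_not_le hle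
      have hwit : ∃ l ∈ lines, psB_rank T (PySem.Str.lower l) < psB_rank T (PySem.Str.lower x) := by
        rcases hach with he | ⟨l, hl, hv⟩
        · exfalso
          have := pv_rank_le T (PySem.Str.lower x)
          rw [he] at hx; omega
        · exact ⟨l, hl, by omega⟩
      obtain ⟨y, h1, h2⟩ := pv_scan_skip T lines.reverse x
        (by obtain ⟨l, hl, hv⟩ := hwit; exact ⟨l, List.mem_reverse.mpr hl, hv⟩)
      have hres : pvRes T (lines ++ [x]) = pvRes T lines := by
        unfold pvRes
        simp only [List.reverse_append, List.reverse_cons, List.reverse_nil, List.nil_append,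
          List.singleton_append]
        rw [h1, h2]
      have hcond : ¬ psB_rank T (PySem.Str.lower x) ≤ pvMnr T lines := by omega
      rw [hres, show min (pvMnr T lines) (psB_rank T (PySem.Str.lower x))
            = pvMnr T lines from by omega]
      simp [pvCore, hcond]

-- B's raw fold over splitlines equals the core fold over the stripped non-empty lines
theorem pv_fold_strip (T : List (List String)) : ∀ (raws : List String) (s : Nat × String),
    raws.foldl (psB_step T) s =
      (raws.filterMap (fun l => if PySem.Str.strip l ≠ "" then some (PySem.Str.strip l) else none)).foldl (pvCore T) s := by
  intro raws
  induction raws with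
  | nil => intro s; rfl
  | cons r rest ih =>
    intro s
    by_cases hr : PySem.Str.strip r = ""
    · simp [psB_step, hr, ih]
    · simp only [List.foldl_cons, List.filterMap_cons, hr, ne_eq, not_false_iff, if_pos, List.foldl_cons]
      rw [ih]
      congr 1
      simp [psB_step, hr, pvCore, pvCut]

-- B in terms of pvRes
theorem pv_B_res (s o e : String) :
    parse_script_summary_py_alt s o e =
      pvRes (PySem.Dict.getD psB_TIERS s []) (psA_lines (o ++ "\n" ++ e)) := by
  show (List.foldl (psB_step (psB_TIERS.getD s []))
      ((psB_TIERS.getD s []).length + 1, "Completed")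
      (PySem.Str.splitlines (o ++ "\n" ++ e))).2 =
    pvRes (psB_TIERS.getD s []) (psA_lines (o ++ "\n" ++ e))
  rw [pv_fold_strip, pv_fold_char]
  rfl

theorem pv_find?_congr {α : Type} (p q : α → Bool) (h : ∀ a, p a = q a) :
    ∀ l : List α, l.find? p = l.find? q := by
  intro l
  induction l with
  | nil => rfl
  | cons a t ih => simp [List.find?_cons, h a, ih]

-- one tier of pvScan matches one reversed keyword loop of A
theorem pv_scan_cons (lines : List String) (t : List String) (ts : List (List String))
    (p : String → Bool) (hp : ∀ line, psB_hit t (PySem.Str.lower line) = p line) :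
    pvScan lines.reverse (t :: ts)
      = match lines.reverse.find? p with
        | some line => some line
        | none => pvScan lines.reverse ts := by
  simp only [pvScan]
  rw [pv_find?_congr _ _ hp]

-- A in terms of pvRes
theorem pv_A_res (s o e : String) :
    parse_script_summary_py s o e =
      pvRes (PySem.Dict.getD psB_TIERS s []) (psA_lines (o ++ "\n" ++ e)) := by
  unfold parse_script_summary_py psA_revFind pvRes
  by_cases h1 : s = "fetch_sp500_symbols.py"
  · subst h1
    have hget : psB_TIERS.getD "fetch_sp500_symbols.py" [] =
        [["symbol", "wrote", "updated", "saved"], ["new", "removed", "unchanged", "total"]] := by decide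
    simp only [hget]
    rw [pv_scan_cons _ _ _ (fun line =>
          psA_has line "symbol" || psA_has line "wrote" || psA_has line "updated" || psA_has line "saved")
          (fun line => by simp [psB_hit, psA_has, Bool.or_assoc]),
        pv_scan_cons _ _ _ (fun line =>
          ["new", "removed", "unchanged", "total"].any (fun k => psA_has line k))
          (fun line => by simp [psB_hit, psA_has])]
    cases (psA_lines (o ++ "\n" ++ e)).reverse.find? (fun line =>
        psA_has line "symbol" || psA_has line "wrote" || psA_has line "updated" || psA_has line "saved") <;>
      cases (psA_lines (o ++ "\n" ++ e)).reverse.find? (fun line =>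
        ["new", "removed", "unchanged", "total"].any (fun k => psA_has line k)) <;>
      simp [pvScan, pvCut]
  rw [if_neg h1]
  by_cases h2 : s = "prefetch_options_datasp.py"
  · subst h2
    have hget : psB_TIERS.getD "prefetch_options_datasp.py" [] =
        [["done", "complete", "skipped", "fetched", "saved", "error", "total"]] := by decide
    simp only [hget]
    rw [pv_scan_cons _ _ _ (fun line =>
          ["done", "complete", "skipped", "fetched", "saved", "error", "total"].any (fun k => psA_has line k))
          (fun line => by simp [psB_hit, psA_has])]
    cases (psA_lines (o ++ "\n" ++ e)).reverse.find? (fun line =>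
        ["done", "complete", "skipped", "fetched", "saved", "error", "total"].any (fun k => psA_has line k)) <;>
      simp [pvScan, pvCut]
  rw [if_neg h2]
  by_cases h3 : s = "optsp.py" ∨ s = "opsp.py"
  · have hget : psB_TIERS.getD s [] =
        [["saved", "recommendation", "returned"], ["iron_condor"]] := by
      rcases h3 with h | h <;> subst h <;> decide
    simp only [if_pos h3, hget]
    rw [pv_scan_cons _ _ _ (fun line =>
          psA_has line "saved" || psA_has line "recommendation" || psA_has line "returned")
          (fun line => by simp [psB_hit, psA_has, Bool.or_assoc]),
        pv_scan_cons _ _ _ (fun line => psA_has line "iron_condor")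
          (fun line => by simp [psB_hit, psA_has])]
    cases (psA_lines (o ++ "\n" ++ e)).reverse.find? (fun line =>
        psA_has line "saved" || psA_has line "recommendation" || psA_has line "returned") <;>
      cases (psA_lines (o ++ "\n" ++ e)).reverse.find? (fun line => psA_has line "iron_condor") <;>
      simp [pvScan, pvCut]
  rw [if_neg h3]
  by_cases h4 : s = "exeopt.py"
  · subst h4
    have hget : psB_TIERS.getD "exeopt.py" [] =
        [["order", "placed", "executed", "ibkr", "done"]] := by decide
    simp only [hget]
    rw [pv_scan_cons _ _ _ (fun line =>
          ["order", "placed", "executed", "ibkr", "done"].any (fun k => psA_has line k))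
          (fun line => by simp [psB_hit, psA_has])]
    cases (psA_lines (o ++ "\n" ++ e)).reverse.find? (fun line =>
        ["order", "placed", "executed", "ibkr", "done"].any (fun k => psA_has line k)) <;>
      simp [pvScan, pvCut]
  rw [if_neg h4]
  obtain ⟨h3a, h3b⟩ := not_or.mp h3
  have hget : psB_TIERS.getD s [] = [] := by
    have hm : psB_TIERS = PySem.Dict.mk
        [ ("fetch_sp500_symbols.py",
            [["symbol", "wrote", "updated", "saved"], ["new", "removed", "unchanged", "total"]]),
          ("prefetch_options_datasp.py",
            [["done", "complete", "skipped", "fetched", "saved", "error", "total"]]),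
          ("optsp.py", [["saved", "recommendation", "returned"], ["iron_condor"]]),
          ("opsp.py", [["saved", "recommendation", "returned"], ["iron_condor"]]),
          ("exeopt.py", [["order", "placed", "executed", "ibkr", "done"]]) ] := by decide
    have b1 : ("fetch_sp500_symbols.py" == s) = false := by
      simp only [beq_eq_false_iff_ne]; exact fun h => h1 h.symm
    have b2 : ("prefetch_options_datasp.py" == s) = false := by
      simp only [beq_eq_false_iff_ne]; exact fun h => h2 h.symm
    have b3 : ("optsp.py" == s) = false := by
      simp only [beq_eq_false_iff_ne]; exact fun h => h3a h.symm
    have b4 : ("opsp.py" == s) = false := by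
      simp only [beq_eq_false_iff_ne]; exact fun h => h3b h.symm
    have b5 : ("exeopt.py" == s) = false := by
      simp only [beq_eq_false_iff_ne]; exact fun h => h4 h.symm
    rw [hm]
    simp [PySem.Dict.getD, PySem.Dict.get?, b1, b2, b3, b4, b5]
  simp only [hget, pvScan, pvCut]

-- ===== VERDICT (by name: the statement is the Claim_ definition above) =====
theorem parse_script_summary_py_spec : Claim_equal_parse_script_summary_py := by
  intro s o e _
  unfold Spec_parse_script_summary_py
  rw [pv_A_res, pv_B_res]
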